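-- pv_equiv track=rewrite | github.com/BohdanKrasovskyi/Jezyki_Skryptowe | lista_2/utils.py | if_two_words_starts_with_same_letter
-- ===== SOURCE A (Python) =====
-- def if_two_words_starts_with_same_letter(sentence):
--     word1 = ""
--     word2 = ""
--     for char in sentence + " ":
--         if char.isalpha():
--             word1 += char
--         elif word1 != "":
--             if word2 != "" and word1[0].lower() == word2[0].lower():
--                 return True
--             word2 = word1
--             word1 = ""
--     return False
-- ===== SOURCE B (Python) =====
-- def if_two_words_starts_with_same_letter(sentence):
--     # No word strings are ever built: pair each character with its predecessor
--     # (padding with '\0') to pick out exactly the word-initial letters, then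
--     # look for an adjacent duplicate among those lowercased initials.
--     firsts = [c.lower() for prev, c in zip('\0' + sentence, sentence)
--               if c.isalpha() and not prev.isalpha()]
--     return any(x == y for x, y in zip(firsts, firsts[1:]))
-- ===== Notes on version B (the rewrite author's own statement) =====
-- stated objective: alternative
-- what changed: B never builds word strings: it pairs each character with its predecessor (shifted zip) to pick out exactly the word-initial letters, then looks for an adjacent duplicate in that lowercased initials sequence, versus A's fused scan that accumulates whole words and compares their first characters with early return.
import Mathlib
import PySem

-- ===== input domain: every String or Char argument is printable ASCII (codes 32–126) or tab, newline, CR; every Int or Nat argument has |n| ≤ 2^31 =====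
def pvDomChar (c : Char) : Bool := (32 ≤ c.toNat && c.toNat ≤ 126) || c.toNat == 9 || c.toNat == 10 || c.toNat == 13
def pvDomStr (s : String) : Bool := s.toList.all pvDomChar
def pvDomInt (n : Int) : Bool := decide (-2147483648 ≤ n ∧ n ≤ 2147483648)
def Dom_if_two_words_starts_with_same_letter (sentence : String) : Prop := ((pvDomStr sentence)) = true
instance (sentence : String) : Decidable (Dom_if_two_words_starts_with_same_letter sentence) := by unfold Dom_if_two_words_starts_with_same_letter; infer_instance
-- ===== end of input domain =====

-- B never builds word strings: a shifted-zip boundary test collects the lowercased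
-- word-initial letters, then an adjacent-duplicate check over that sequence (alternative).

-- ===== PORT A =====
-- A's loop over `sentence + " "`: state (word1, word2) as lists of chars, early return = returning true.
-- word1[0] is guarded by word1 != "" in A; headD 'a' is that guarded first character.
def pvGoA : List Char → List Char → List Char → Bool
  | [], _, _ => false
  | c :: cs, word1, word2 =>
    if PySem.Chars.isalpha c then
      pvGoA cs (word1 ++ [c]) word2
    else if word1 ≠ [] then
      if word2 ≠ [] ∧ PySem.Chars.lowerChar (word1.headD 'a') = PySem.Chars.lowerChar (word2.headD 'a') then
        true
      else
        pvGoA cs [] word1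
    else
      pvGoA cs word1 word2

def if_two_words_starts_with_same_letter (sentence : String) : Bool :=
  pvGoA (sentence.toList ++ [' ']) [] []

-- ===== PORT B =====
-- Source B: firsts = [c.lower() for prev, c in zip('\0' + sentence, sentence)
--                 if c.isalpha() and not prev.isalpha()]
--       return any(x == y for x, y in zip(firsts, firsts[1:]))
def if_two_words_starts_with_same_letter_alt (sentence : String) : Bool :=
  let cs := sentence.toList
  let firsts := ((Char.ofNat 0 :: cs).zip cs).filterMap
    (fun p => if PySem.Chars.isalpha p.2 && !PySem.Chars.isalpha p.1
              then some (PySem.Chars.lowerChar p.2) else none)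
  (firsts.zip firsts.tail).any (fun p => p.1 == p.2)

-- ===== PRECONDITION & SPEC =====
def Spec_if_two_words_starts_with_same_letter (sentence : String) (out : Bool) : Prop := out = if_two_words_starts_with_same_letter_alt sentence
instance (sentence : String) (out : Bool) : Decidable (Spec_if_two_words_starts_with_same_letter sentence out) := by unfold Spec_if_two_words_starts_with_same_letter; infer_instance

-- ===== CLAIM (what is proved, stated in full; the proofs are below) =====
def Claim_equal_if_two_words_starts_with_same_letter : Prop := ∀ (sentence : String), Dom_if_two_words_starts_with_same_letter sentence → Spec_if_two_words_starts_with_same_letter sentence (if_two_words_starts_with_same_letter sentence)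

-- ===== LEMMAS AND PROOFS =====

-- word extraction (proof-side: maximal alphabetic runs, final flush)
def pvExtract : List Char → List Char → List (List Char)
  | [], cur => if cur ≠ [] then [cur] else []
  | c :: cs, cur =>
    if PySem.Chars.isalpha c then
      pvExtract cs (cur ++ [c])
    else if cur ≠ [] then
      cur :: pvExtract cs []
    else
      pvExtract cs []

-- no-flush extraction: the words-so-far while the scan is still running
def pvExtractNF : List Char → List Char → List (List Char)
  | [], _ => []
  | c :: cs, cur =>
    if PySem.Chars.isalpha c then
      pvExtractNF cs (cur ++ [c])
    else if cur ≠ [] then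
      cur :: pvExtractNF cs []
    else
      pvExtractNF cs []

-- adjacency of lowered first letters, recursively on the word list
def pvAdj : List (List Char) → Bool
  | w1 :: w2 :: ws =>
    (PySem.Chars.lowerChar (w1.headD 'a') = PySem.Chars.lowerChar (w2.headD 'a')) || pvAdj (w2 :: ws)
  | _ => false

-- lowered first letters of a word list
def pvHeads (ws : List (List Char)) : List Char :=
  ws.map (fun w => PySem.Chars.lowerChar (w.headD 'a'))

-- B's comprehension in recursive form
def pvZF : Char → List Char → List Char
  | _, [] => []
  | prev, c :: cs =>
    (if PySem.Chars.isalpha c && !PySem.Chars.isalpha prev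
     then [PySem.Chars.lowerChar c] else []) ++ pvZF c cs

theorem pvZF_eq_filterMap : ∀ (cs : List Char) (prev : Char),
    pvZF prev cs = ((prev :: cs).zip cs).filterMap
      (fun p => if PySem.Chars.isalpha p.2 && !PySem.Chars.isalpha p.1
                then some (PySem.Chars.lowerChar p.2) else none)
  | [], _ => rfl
  | c :: cs, prev => by
    simp only [pvZF, List.zip_cons_cons, List.filterMap_cons, pvZF_eq_filterMap cs c]
    split <;> simp

theorem pvExtractNF_append_space : ∀ (cs : List Char) (cur : List Char),
    pvExtractNF (cs ++ [' ']) cur = pvExtract cs cur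
  | [], cur => by
    cases cur <;> simp [pvExtractNF, pvExtract, show PySem.Chars.isalpha ' ' = false from by decide]
  | c :: cs, cur => by
    simp only [List.cons_append, pvExtractNF, pvExtract]
    split_ifs <;> simp [pvExtractNF_append_space cs]

-- main invariant for A: scan from state (word1, word2) decides adjacency of
-- (word2 if nonempty) followed by the words still to be extracted (word1 pending).
theorem pvGoA_eq_adj : ∀ (cs word1 word2 : List Char),
    pvGoA cs word1 word2
      = pvAdj ((if word2 ≠ [] then [word2] else []) ++ pvExtractNF cs word1)
  | [], word1, word2 => by
    simp [pvGoA, pvExtractNF]; split <;> simp [pvAdj]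
  | c :: cs, word1, word2 => by
    simp only [pvGoA, pvExtractNF]
    by_cases ha : PySem.Chars.isalpha c = true
    · simp only [if_pos ha]; exact pvGoA_eq_adj cs (word1 ++ [c]) word2
    · simp only [if_neg ha]
      by_cases h1 : word1 ≠ []
      · simp only [if_pos h1]
        have hib := pvGoA_eq_adj cs ([] : List Char) word1
        rw [if_pos h1] at hib
        by_cases h2 : word2 ≠ []
        · simp only [if_pos h2, List.singleton_append]
          by_cases heq : PySem.Chars.lowerChar (word1.headD 'a') = PySem.Chars.lowerChar (word2.headD 'a')
          · rw [if_pos ⟨h2, heq⟩]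
            simp only [pvAdj]
            rw [heq.symm]
            simp
          · rw [if_neg (fun hc => heq hc.2), hib, List.singleton_append]
            simp only [pvAdj]
            have hne : ¬ (PySem.Chars.lowerChar (word2.headD 'a') = PySem.Chars.lowerChar (word1.headD 'a')) :=
              fun h => heq h.symm
            simp only [List.headD_eq_head?_getD] at hne
            simp [hne]
        · rw [if_neg (fun hc : word2 ≠ [] ∧ _ => h2 hc.1), if_neg h2, hib,
              List.singleton_append, List.nil_append]
      · simp only [if_neg h1]
        have h1' : word1 = [] := not_not.mp h1
        subst h1'
        exact pvGoA_eq_adj cs [] word2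

-- a nonempty pending run heads the first extracted word
theorem pvExtract_head : ∀ (cs : List Char) (h : Char) (t : List Char),
    ∃ ext rest, pvExtract cs (h :: t) = ((h :: t) ++ ext) :: rest
  | [], h, t => ⟨[], [], by simp [pvExtract]⟩
  | c :: cs, h, t => by
    by_cases ha : PySem.Chars.isalpha c = true
    · obtain ⟨ext, rest, he⟩ := pvExtract_head cs h (t ++ [c])
      exact ⟨[c] ++ ext, rest, by simp [pvExtract, ha, he]⟩
    · exact ⟨[], pvExtract cs [], by simp [pvExtract, ha]⟩

-- B's comprehension computes the lowered heads of the extracted words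
-- (dropping the first when the scan starts mid-word).
theorem pvZF_spec : ∀ (cs : List Char) (prev : Char) (cur : List Char),
    (PySem.Chars.isalpha prev = true → cur ≠ []) →
    (PySem.Chars.isalpha prev = false → cur = []) →
    pvZF prev cs = if PySem.Chars.isalpha prev then (pvHeads (pvExtract cs cur)).tail
                   else pvHeads (pvExtract cs cur)
  | [], prev, cur => by
    intro hp hn
    by_cases ha : PySem.Chars.isalpha prev = true
    · have := hp ha
      obtain ⟨h, t, rfl⟩ := List.exists_cons_of_ne_nil this
      simp [pvZF, pvExtract, pvHeads, ha]
    · rw [hn (by simpa using ha)]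
      simp [pvZF, pvExtract, pvHeads, ha]
  | c :: cs, prev, cur => by
    intro hp hn
    by_cases ha : PySem.Chars.isalpha c = true
    · by_cases hb : PySem.Chars.isalpha prev = true
      · -- mid-word continuation: nothing emitted
        have hcur := hp hb
        have ih := pvZF_spec cs c (cur ++ [c]) (fun _ => by simp) (by simp [ha])
        rw [if_pos ha] at ih
        simp [pvZF, ha, hb, pvExtract, ih]
      · -- word start: emit lower c
        have hb' : PySem.Chars.isalpha prev = false := by simpa using hb
        have hcur := hn hb'
        subst hcur
        have ih := pvZF_spec cs c ([c]) (fun _ => by simp) (by simp [ha])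
        rw [if_pos ha] at ih
        obtain ⟨ext, rest, he⟩ := pvExtract_head cs c []
        simp only [pvZF, ha, Bool.not_false, Bool.and_true,
          List.singleton_append, pvExtract, List.nil_append, hb',
          Bool.false_eq_true, if_false, ih, he, pvHeads, List.map_cons]
        simp
    · -- non-alpha char: flush (or nothing), nothing emitted
      have ih := pvZF_spec cs c [] (by simp [ha]) (fun _ => rfl)
      rw [if_neg (by simp [ha])] at ih
      by_cases hb : PySem.Chars.isalpha prev = true
      · have hcur := hp hb
        obtain ⟨h, t, rfl⟩ := List.exists_cons_of_ne_nil hcur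
        simp [pvZF, ha, hb, pvExtract, ih, pvHeads]
      · have hb' : PySem.Chars.isalpha prev = false := by simpa using hb
        rw [hn hb']
        simp [pvZF, ha, hb', pvExtract, ih]

-- adjacency over words = adjacent-duplicate over their lowered heads
theorem pvAdj_eq_heads : ∀ (ws : List (List Char)),
    pvAdj ws = ((pvHeads ws).zip (pvHeads ws).tail).any (fun p => p.1 == p.2)
  | [] => rfl
  | [_] => rfl
  | w1 :: w2 :: ws => by
    simp [pvAdj, pvHeads, pvAdj_eq_heads (w2 :: ws), List.any_cons, Bool.beq_eq_decide_eq]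

-- ===== VERDICT (by name: the statement is the Claim_ definition above) =====
theorem if_two_words_starts_with_same_letter_spec : Claim_equal_if_two_words_starts_with_same_letter := by
  intro sentence _
  show _ = _
  have hA : if_two_words_starts_with_same_letter sentence
      = pvAdj (pvExtract sentence.toList []) := by
    unfold if_two_words_starts_with_same_letter
    rw [pvGoA_eq_adj, pvExtractNF_append_space]
    simp
  have hB : if_two_words_starts_with_same_letter_alt sentence
      = ((pvZF (Char.ofNat 0) sentence.toList).zip
          (pvZF (Char.ofNat 0) sentence.toList).tail).any (fun p => p.1 == p.2) := by
    show ((((Char.ofNat 0 :: sentence.toList).zip sentence.toList).filterMap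
        (fun p => if PySem.Chars.isalpha p.2 && !PySem.Chars.isalpha p.1
                  then some (PySem.Chars.lowerChar p.2) else none)).zip
        (((Char.ofNat 0 :: sentence.toList).zip sentence.toList).filterMap
        (fun p => if PySem.Chars.isalpha p.2 && !PySem.Chars.isalpha p.1
                  then some (PySem.Chars.lowerChar p.2) else none)).tail).any (fun p => p.1 == p.2) = _
    rw [← pvZF_eq_filterMap]
  rw [hA, hB, pvAdj_eq_heads,
    pvZF_spec sentence.toList (Char.ofNat 0) []
      (by intro h; exact absurd h (by decide)) (fun _ => rfl)]
  rw [if_neg (by decide)]
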